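-- pv_equiv track=rewrite | github.com/jmsung/einstein | scripts/difference_bases/bose_chowla.py | contiguous_prefix
-- ===== SOURCE A (Python) =====
-- def contiguous_prefix(B):
--     """c(B): largest L such that {1, ..., L} ⊆ (B-B)⁺."""
--     diffs = set()
--     n = len(B)
--     for i in range(n):
--         for j in range(i):
--             d = B[i] - B[j]
--             if d > 0:
--                 diffs.add(d)
--     L = 0
--     while (L + 1) in diffs:
--         L += 1
--     return L
-- ===== SOURCE B (Python) =====
-- def contiguous_prefix(B):
--     """c(B): largest L such that {1, ..., L} ⊆ (B-B)⁺."""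
--     first = {}
--     last = {}
--     for idx, x in enumerate(B):
--         if x not in first:
--             first[x] = idx
--         last[x] = idx
--     vals = sorted(first)
--     L = 0
--     while any(first[v] < last.get(v + L + 1, -1) for v in vals):
--         L += 1
--     return L
-- ===== Notes on version B (the rewrite author's own statement) =====
-- stated objective: faster
-- what changed: Instead of materialising the whole O(n^2) set of positive ordered pairwise differences with nested index loops and then walking the prefix, B records each value's first and last index in one pass and walks the prefix directly, testing candidate d = L+1 by an early-exiting scan 'some value v has v+d occurring at a later index' over the sorted distinct values.
import Mathlib
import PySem

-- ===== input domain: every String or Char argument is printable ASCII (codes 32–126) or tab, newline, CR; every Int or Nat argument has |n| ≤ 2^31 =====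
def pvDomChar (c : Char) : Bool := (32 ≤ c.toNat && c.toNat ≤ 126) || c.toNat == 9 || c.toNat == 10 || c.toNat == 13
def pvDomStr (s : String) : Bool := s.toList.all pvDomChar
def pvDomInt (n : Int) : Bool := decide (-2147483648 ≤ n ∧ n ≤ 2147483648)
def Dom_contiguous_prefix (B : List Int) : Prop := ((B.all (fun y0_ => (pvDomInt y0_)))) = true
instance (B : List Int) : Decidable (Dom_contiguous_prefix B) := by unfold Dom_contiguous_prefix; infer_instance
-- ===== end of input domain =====

-- B records each value's first and last index in one pass and walks the prefix directly, testing
-- candidate d = L+1 by 'some value v has v + d at a later index', instead of A's nested-loop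
-- precomputation of the whole positive ordered pairwise-difference set; same return value.

-- ===== PORT A =====
-- 'while (L + 1) in diffs: L += 1' as fuelled recursion; each iteration needs a fresh member of
-- diffs, so diffs.length steps of fuel always suffice (proved in the lemmas below).
def pvWhileA (diffs : PySem.Set Int) (L : Int) : Nat → Int
  | 0 => L
  | fuel + 1 => if PySem.Set.contains diffs (L + 1) then pvWhileA diffs (L + 1) fuel else L

def contiguous_prefix (B : List Int) : Int :=
  let n : Int := (B.length : Int)
  let diffs : PySem.Set Int :=
    (PySem.List.pyRange 0 n 1).foldl (fun diffs i =>
      (PySem.List.pyRange 0 i 1).foldl (fun diffs j =>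
        let d := PySem.List.pyGetD B i 0 - PySem.List.pyGetD B j 0
        if 0 < d then PySem.Set.add diffs d else diffs) diffs)
      PySem.Set.empty
  pvWhileA diffs 0 diffs.length

-- ===== PORT B =====
-- 'for idx, x in enumerate(B): if x not in first: first[x] = idx; last[x] = idx'
def pvBuildFL (B : List Int) : PySem.Dict Int Int × PySem.Dict Int Int :=
  (PySem.List.enumerate B 0).foldl
    (fun fl p =>
      (if PySem.Dict.contains fl.1 p.2 then fl.1 else PySem.Dict.insert fl.1 p.2 p.1,
       PySem.Dict.insert fl.2 p.2 p.1))
    (PySem.Dict.empty, PySem.Dict.empty)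

-- 'any(first[v] < last.get(v + d, -1) for v in vals)'; first[v] cannot raise here (every v in
-- vals is a key of first), so it is ported as getD with an unreachable default 0
def pvAnyDiff (first last : PySem.Dict Int Int) (vals : List Int) (d : Int) : Bool :=
  vals.any (fun v => decide (PySem.Dict.getD first v 0 < PySem.Dict.getD last (v + d) (-1)))

-- 'while any(...): L += 1' as fuelled recursion; every successful candidate d is a distinct
-- positive pairwise difference and there are fewer than B.length * B.length of those (proved below).
def pvWhileB (first last : PySem.Dict Int Int) (vals : List Int) (L : Int) : Nat → Int
  | 0 => L
  | fuel + 1 => if pvAnyDiff first last vals (L + 1) then pvWhileB first last vals (L + 1) fuel else L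

def contiguous_prefix_alt (B : List Int) : Int :=
  let fl := pvBuildFL B
  let vals := PySem.List.sorted (PySem.Dict.keys fl.1) (fun v => v) false
  pvWhileB fl.1 fl.2 vals 0 (B.length * B.length)

-- ===== PRECONDITION & SPEC =====
def Spec_contiguous_prefix (B : List Int) (out : Int) : Prop := out = contiguous_prefix_alt B
instance (B : List Int) (out : Int) : Decidable (Spec_contiguous_prefix B out) := by unfold Spec_contiguous_prefix; infer_instance

-- ===== CLAIM (what is proved, stated in full; the proofs are below) =====
def Claim_equal_contiguous_prefix : Prop := ∀ (B : List Int), Dom_contiguous_prefix B → Spec_contiguous_prefix B (contiguous_prefix B)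

-- ===== LEMMAS AND PROOFS =====

-- proof-side restatement of A's nested difference-collecting loops over Nat ranges
def pvInner (B : List Int) (i : Nat) (s : PySem.Set Int) : PySem.Set Int :=
  (List.range i).foldl (fun s j =>
    if 0 < B.getD i 0 - B.getD j 0 then PySem.Set.add s (B.getD i 0 - B.getD j 0) else s) s

def pvOuter (B : List Int) (m : Nat) : PySem.Set Int :=
  (List.range m).foldl (fun s i => pvInner B i s) PySem.Set.empty

lemma pv_diffs_eq (B : List Int) :
    contiguous_prefix B = pvWhileA (pvOuter B B.length) 0 (pvOuter B B.length).length := by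
  simp only [contiguous_prefix, pvOuter, pvInner, PySem.List.pyRange_zero_nat, List.foldl_map,
    PySem.List.pyGetD_natCast]

lemma pv_fold_mem (B : List Int) (i : Nat) (d : Int) : ∀ (l : List Nat) (s : PySem.Set Int),
    (d ∈ l.foldl (fun s j => if 0 < B.getD i 0 - B.getD j 0 then PySem.Set.add s (B.getD i 0 - B.getD j 0) else s) s
      ↔ d ∈ s ∨ (0 < d ∧ ∃ j ∈ l, B.getD i 0 - B.getD j 0 = d))
  | [], s => by simp
  | jj :: l, s => by
    rw [List.foldl_cons]
    rw [pv_fold_mem B i d l]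
    constructor
    · rintro (hmem | ⟨hd, j, hj, he⟩)
      · split_ifs at hmem with h
        · rcases (PySem.Set.mem_add s _ d).1 hmem with hs | rfl
          · exact Or.inl hs
          · exact Or.inr ⟨h, jj, List.mem_cons_self .., rfl⟩
        · exact Or.inl hmem
      · exact Or.inr ⟨hd, j, List.mem_cons_of_mem _ hj, he⟩
    · rintro (hs | ⟨hd, j, hj, he⟩)
      · split_ifs with h
        · exact Or.inl ((PySem.Set.mem_add s _ d).2 (Or.inl hs))
        · exact Or.inl hs
      · rcases List.mem_cons.1 hj with rfl | hj
        · have h : 0 < B.getD i 0 - B.getD j 0 := he ▸ hd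
          rw [if_pos h]
          exact Or.inl ((PySem.Set.mem_add s _ d).2 (Or.inr he.symm))
        · exact Or.inr ⟨hd, j, hj, he⟩

lemma pvInner_mem (B : List Int) (i : Nat) (s : PySem.Set Int) (d : Int) :
    d ∈ pvInner B i s ↔ d ∈ s ∨ (0 < d ∧ ∃ j, j < i ∧ B.getD i 0 - B.getD j 0 = d) := by
  rw [pvInner, pv_fold_mem]
  simp [List.mem_range]

lemma pvOuter_mem (B : List Int) (m : Nat) (d : Int) :
    d ∈ pvOuter B m ↔ 0 < d ∧ ∃ i j : Nat, j < i ∧ i < m ∧ B.getD i 0 - B.getD j 0 = d := by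
  induction m with
  | zero => simp [pvOuter, PySem.Set.empty]
  | succ m ih =>
    rw [pvOuter, List.range_succ, List.foldl_append] at *
    simp only [List.foldl_cons, List.foldl_nil]
    rw [pvInner_mem, show ((List.range m).foldl (fun s i => pvInner B i s) PySem.Set.empty) = pvOuter B m from rfl] at *
    rw [ih]
    constructor
    · rintro (⟨hd, i, j, hji, him, he⟩ | ⟨hd, j, hj, he⟩)
      · exact ⟨hd, i, j, hji, by omega, he⟩
      · exact ⟨hd, m, j, hj, by omega, he⟩
    · rintro ⟨hd, i, j, hji, him, he⟩
      by_cases h : i = m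
      · subst h; exact Or.inr ⟨hd, j, hji, he⟩
      · exact Or.inl ⟨hd, i, j, hji, by omega, he⟩

lemma pv_fold_len (B : List Int) (i : Nat) : ∀ (l : List Nat) (s : PySem.Set Int),
    (l.foldl (fun s j => if 0 < B.getD i 0 - B.getD j 0 then PySem.Set.add s (B.getD i 0 - B.getD j 0) else s) s).length ≤ s.length + l.length
  | [], s => by simp
  | jj :: l, s => by
    rw [List.foldl_cons]
    refine le_trans (pv_fold_len B i l _) ?_
    have : (if 0 < B.getD i 0 - B.getD jj 0 then PySem.Set.add s (B.getD i 0 - B.getD jj 0) else s).length ≤ s.length + 1 := by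
      split_ifs with h
      · rw [PySem.Set.add_eq_ite]; split_ifs <;> simp
      · omega
    simp only [List.length_cons]; omega

lemma pvOuter_len (B : List Int) (m : Nat) : (pvOuter B m).length ≤ m * m := by
  induction m with
  | zero => simp [pvOuter, PySem.Set.empty]
  | succ m ih =>
    rw [pvOuter, List.range_succ, List.foldl_append]
    simp only [List.foldl_cons, List.foldl_nil]
    have h1 := pv_fold_len B m (List.range m) (pvOuter B m)
    rw [List.length_range] at h1
    calc (pvInner B m (pvOuter B m)).length ≤ m * m + m := le_trans h1 (by omega)
      _ ≤ (m + 1) * (m + 1) := by nlinarith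

lemma pvBuildFL_append (xs : List Int) (x : Int) :
    pvBuildFL (xs ++ [x]) =
      ((if (pvBuildFL xs).1.contains x = true then (pvBuildFL xs).1 else (pvBuildFL xs).1.insert x (xs.length : Int)),
       (pvBuildFL xs).2.insert x (xs.length : Int)) := by
  unfold pvBuildFL
  rw [PySem.List.enumerate_append, List.foldl_append]
  simp [PySem.List.enumerate]

-- 'last' maps each key to an index holding it …
lemma pvL_A (B : List Int) : ∀ (v l : Int), (pvBuildFL B).2.get? v = some l →
    ∃ j : Nat, l = (j : Int) ∧ j < B.length ∧ B.getD j 0 = v := by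
  induction B using List.reverseRecOn with
  | nil => intro v l h; simp [pvBuildFL, PySem.List.enumerate, PySem.Dict.empty, PySem.Dict.get?] at h
  | append_singleton xs x ih =>
    intro v l h
    rw [pvBuildFL_append] at h
    by_cases hv : v = x
    · subst hv
      rw [PySem.Dict.get?_insert_self] at h
      obtain rfl : l = (xs.length : Int) := by simpa using h.symm
      exact ⟨xs.length, rfl, by simp, by simp⟩
    · rw [PySem.Dict.get?_insert_of_ne _ _ hv] at h
      obtain ⟨j, rfl, hj, he⟩ := ih v l h
      exact ⟨j, rfl, by simp; omega, by rw [List.getD_append _ _ _ _ hj]; exact he⟩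

-- … and that index is at or after every occurrence of the key
lemma pvL_B (B : List Int) : ∀ (j : Nat) (v : Int), j < B.length → B.getD j 0 = v →
    ∃ l, (pvBuildFL B).2.get? v = some l ∧ (j : Int) ≤ l := by
  induction B using List.reverseRecOn with
  | nil => intro j v hj _; simp at hj
  | append_singleton xs x ih =>
    intro j v hj he
    rw [pvBuildFL_append]
    by_cases hv : v = x
    · subst hv
      refine ⟨(xs.length : Int), PySem.Dict.get?_insert_self _ _ _, ?_⟩
      simp at hj; exact_mod_cast by omega
    · have hjlt : j < xs.length := by
        by_contra hge
        have : j = xs.length := by simp at hj; omega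
        subst this
        rw [List.getD_append_right _ _ _ _ (le_refl _)] at he
        simp at he; exact hv he.symm
      rw [List.getD_append _ _ _ _ hjlt] at he
      obtain ⟨l, hl, hle⟩ := ih j v hjlt he
      exact ⟨l, by rw [PySem.Dict.get?_insert_of_ne _ _ hv]; exact hl, hle⟩

-- 'first' maps each key to an index holding it …
lemma pvF_A (B : List Int) : ∀ (v f : Int), (pvBuildFL B).1.get? v = some f →
    ∃ j : Nat, f = (j : Int) ∧ j < B.length ∧ B.getD j 0 = v := by
  induction B using List.reverseRecOn with
  | nil => intro v f h; simp [pvBuildFL, PySem.List.enumerate, PySem.Dict.empty, PySem.Dict.get?] at h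
  | append_singleton xs x ih =>
    intro v f h
    rw [pvBuildFL_append] at h
    simp only at h
    split_ifs at h with hc
    · obtain ⟨j, rfl, hj, he⟩ := ih v f h
      exact ⟨j, rfl, by simp; omega, by rw [List.getD_append _ _ _ _ hj]; exact he⟩
    · by_cases hv : v = x
      · subst hv
        rw [PySem.Dict.get?_insert_self] at h
        obtain rfl : f = (xs.length : Int) := by simpa using h.symm
        exact ⟨xs.length, rfl, by simp, by simp⟩
      · rw [PySem.Dict.get?_insert_of_ne _ _ hv] at h
        obtain ⟨j, rfl, hj, he⟩ := ih v f h
        exact ⟨j, rfl, by simp; omega, by rw [List.getD_append _ _ _ _ hj]; exact he⟩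

lemma pvF_contains (B : List Int) : ∀ v : Int, (pvBuildFL B).1.contains v = true ↔ v ∈ B := by
  induction B using List.reverseRecOn with
  | nil => intro v; simp [pvBuildFL, PySem.List.enumerate, PySem.Dict.empty]
  | append_singleton xs x ih =>
    intro v
    rw [pvBuildFL_append]
    simp only
    split_ifs with hc
    · rw [ih]
      constructor
      · intro h; exact List.mem_append_left _ h
      · intro h
        rcases List.mem_append.1 h with h | h
        · exact h
        · simp at h; subst h; exact (ih v).1 hc
    · rw [PySem.Dict.contains_insert]
      simp only [Bool.or_eq_true, beq_iff_eq]
      rw [ih]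
      simp [or_comm]

-- … and that index is at or before every occurrence of the key
lemma pvF_B (B : List Int) : ∀ (j : Nat) (v : Int), j < B.length → B.getD j 0 = v →
    ∃ f, (pvBuildFL B).1.get? v = some f ∧ f ≤ (j : Int) := by
  induction B using List.reverseRecOn with
  | nil => intro j v hj _; simp at hj
  | append_singleton xs x ih =>
    intro j v hj he
    rw [pvBuildFL_append]
    simp only
    by_cases hjlt : j < xs.length
    · rw [List.getD_append _ _ _ _ hjlt] at he
      obtain ⟨f, hf, hle⟩ := ih j v hjlt he
      split_ifs with hc
      · exact ⟨f, hf, hle⟩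
      · have hvx : v ≠ x := by
          intro hvx; subst hvx
          apply hc
          apply (pvF_contains xs _).2
          rw [List.getD_eq_getElem _ _ hjlt] at he
          exact he ▸ List.getElem_mem hjlt
        exact ⟨f, by rw [PySem.Dict.get?_insert_of_ne _ _ hvx]; exact hf, hle⟩
    · have hje : j = xs.length := by simp at hj; omega
      subst hje
      rw [List.getD_append_right _ _ _ _ (le_refl _)] at he
      simp at he
      obtain rfl : v = x := he.symm
      split_ifs with hc
      · have hvxs : v ∈ xs := (pvF_contains xs v).1 hc
        obtain ⟨j2, hj2, he2⟩ := List.mem_iff_getElem.1 hvxs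
        obtain ⟨f, hf, hle⟩ := ih j2 v hj2 (by rw [List.getD_eq_getElem _ _ hj2]; exact he2)
        exact ⟨f, hf, le_trans hle (by exact_mod_cast by omega)⟩
      · exact ⟨(xs.length : Int), PySem.Dict.get?_insert_self _ _ _, le_refl _⟩

-- B's test 'some value v has v + d at a later index' is exactly 'd is a positive ordered pairwise difference'
lemma pvAny_iff (B : List Int) (d : Int) :
    pvAnyDiff (pvBuildFL B).1 (pvBuildFL B).2
        (PySem.List.sorted (PySem.Dict.keys (pvBuildFL B).1) (fun v => v) false) d = true
      ↔ ∃ i j : Nat, j < i ∧ i < B.length ∧ B.getD i 0 - B.getD j 0 = d := by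
  rw [pvAnyDiff, List.any_eq_true]
  constructor
  · rintro ⟨v, hv, hlt⟩
    rw [decide_eq_true_iff] at hlt
    rw [PySem.List.mem_sorted] at hv
    have hcont : (pvBuildFL B).1.contains v = true := by
      rw [PySem.Dict.contains_iff_mem_keys]; exact hv
    rw [PySem.Dict.contains_eq_isSome_get?] at hcont
    obtain ⟨f, hf⟩ := Option.isSome_iff_exists.1 hcont
    obtain ⟨jf, rfl, hjf, hef⟩ := pvF_A B v f hf
    rw [PySem.Dict.getD_of_get?_eq_some _ _ hf] at hlt
    cases hl : (pvBuildFL B).2.get? (v + d) with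
    | none =>
      rw [PySem.Dict.getD_of_get?_eq_none _ _ hl] at hlt
      omega
    | some l =>
      rw [PySem.Dict.getD_of_get?_eq_some _ _ hl] at hlt
      obtain ⟨jl, rfl, hjl, hel⟩ := pvL_A B (v + d) l hl
      refine ⟨jl, jf, by exact_mod_cast hlt, hjl, ?_⟩
      rw [hel, hef]; ring
  · rintro ⟨i, j, hji, hi, he⟩
    have hj : j < B.length := by omega
    obtain ⟨f, hf, hfle⟩ := pvF_B B j (B.getD j 0) hj rfl
    obtain ⟨l, hl, hlle⟩ := pvL_B B i (B.getD i 0) hi rfl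
    refine ⟨B.getD j 0, ?_, ?_⟩
    · rw [PySem.List.mem_sorted, ← PySem.Dict.contains_iff_mem_keys, pvF_contains]
      rw [List.getD_eq_getElem _ _ hj]
      exact List.getElem_mem hj
    · rw [decide_eq_true_iff]
      have : B.getD j 0 + d = B.getD i 0 := by omega
      rw [this, PySem.Dict.getD_of_get?_eq_some _ _ hf, PySem.Dict.getD_of_get?_eq_some _ _ hl]
      have : ((j : Int)) < ((i : Int)) := by exact_mod_cast hji
      omega

-- the two membership tests agree on every positive candidate
lemma pv_pred_eq (B : List Int) (d : Int) (hd : 0 < d) :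
    PySem.Set.contains (pvOuter B B.length) d
      = pvAnyDiff (pvBuildFL B).1 (pvBuildFL B).2
          (PySem.List.sorted (PySem.Dict.keys (pvBuildFL B).1) (fun v => v) false) d := by
  rw [Bool.eq_iff_iff, PySem.Set.contains_iff, pvOuter_mem, pvAny_iff]
  constructor
  · rintro ⟨_, hp⟩; exact hp
  · intro hp; exact ⟨hd, hp⟩

-- n distinct candidates 1..n all lying in the list D force n ≤ D.length
lemma pv_card_bound (D : List Int) (n : Nat)
    (h : ∀ m : Nat, m < n → ((m : Int) + 1) ∈ D) : n ≤ D.length := by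
  have hsub : ((List.range n).map (fun m : Nat => (m : Int) + 1)) ⊆ D := by
    intro x hx
    simp only [List.mem_map, List.mem_range] at hx
    obtain ⟨m, hm, rfl⟩ := hx
    exact h m hm
  have hnd : ((List.range n).map (fun m : Nat => (m : Int) + 1)).Nodup := by
    refine List.Nodup.map ?_ List.nodup_range
    intro a b hab
    exact_mod_cast add_right_cancel hab
  have := (hnd.subperm hsub).length_le
  simpa using this

lemma pv_stopA (diffs : PySem.Set Int) : ∀ (m : Nat) (L : Int) (f : Nat), m ≤ f →
    (∀ k : Nat, k < m → PySem.Set.contains diffs (L + k + 1) = true) →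
    PySem.Set.contains diffs (L + m + 1) = false →
    pvWhileA diffs L f = L + m
  | 0, L, f, _, _, hstop => by
    simp only [Nat.cast_zero, add_zero] at hstop ⊢
    match f with
    | 0 => rw [pvWhileA]
    | f + 1 => rw [pvWhileA, hstop]; simp
  | m + 1, L, f, hf, hk, hstop => by
    match f with
    | f + 1 =>
      have h0 : PySem.Set.contains diffs (L + 1) = true := by
        have := hk 0 (by omega); simpa using this
      rw [pvWhileA, h0]
      simp only [if_true]
      have := pv_stopA diffs m (L + 1) f (by omega)
        (fun k hkm => by
          have := hk (k + 1) (by omega)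
          rw [show L + 1 + (k : Int) + 1 = L + ((k : Nat) + 1 : Nat) + 1 by push_cast; ring]
          exact this)
        (by rw [show L + 1 + (m : Int) + 1 = L + ((m : Nat) + 1 : Nat) + 1 by push_cast; ring]; exact hstop)
      rw [this]; push_cast; ring

lemma pv_stopB (first last : PySem.Dict Int Int) (vals : List Int) : ∀ (m : Nat) (L : Int) (f : Nat), m ≤ f →
    (∀ k : Nat, k < m → pvAnyDiff first last vals (L + k + 1) = true) →
    pvAnyDiff first last vals (L + m + 1) = false →
    pvWhileB first last vals L f = L + m
  | 0, L, f, _, _, hstop => by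
    simp only [Nat.cast_zero, add_zero] at hstop ⊢
    match f with
    | 0 => rw [pvWhileB]
    | f + 1 => rw [pvWhileB, hstop]; simp
  | m + 1, L, f, hf, hk, hstop => by
    match f with
    | f + 1 =>
      have h0 : pvAnyDiff first last vals (L + 1) = true := by
        have := hk 0 (by omega); simpa using this
      rw [pvWhileB, h0]
      simp only [if_true]
      have := pv_stopB first last vals m (L + 1) f (by omega)
        (fun k hkm => by
          have := hk (k + 1) (by omega)
          rw [show L + 1 + (k : Int) + 1 = L + ((k : Nat) + 1 : Nat) + 1 by push_cast; ring]
          exact this)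
        (by rw [show L + 1 + (m : Int) + 1 = L + ((m : Nat) + 1 : Nat) + 1 by push_cast; ring]; exact hstop)
      rw [this]; push_cast; ring

-- ===== VERDICT (by name: the statement is the Claim_ definition above) =====
theorem contiguous_prefix_spec : Claim_equal_contiguous_prefix := by
  intro B _
  unfold Spec_contiguous_prefix
  have hex : ∃ m : Nat, PySem.Set.contains (pvOuter B B.length) ((m : Int) + 1) = false := by
    by_contra hc
    push Not at hc
    have hall : ∀ m : Nat, m < (pvOuter B B.length).length + 1 → ((m : Int) + 1) ∈ pvOuter B B.length := by
      intro m _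
      cases h : PySem.Set.contains (pvOuter B B.length) ((m : Int) + 1) with
      | false => exact absurd h (hc m)
      | true => exact (PySem.Set.contains_iff _ _).1 h
    have := pv_card_bound (pvOuter B B.length) ((pvOuter B B.length).length + 1) hall
    omega
  have hbound : Nat.find hex ≤ (pvOuter B B.length).length := by
    by_contra hgt
    push Not at hgt
    have hall : ∀ m : Nat, m < (pvOuter B B.length).length + 1 → ((m : Int) + 1) ∈ pvOuter B B.length := by
      intro m hm
      have hne := Nat.find_min hex (m := m) (by omega)
      cases h : PySem.Set.contains (pvOuter B B.length) ((m : Int) + 1) with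
      | false => exact absurd h hne
      | true => exact (PySem.Set.contains_iff _ _).1 h
    have := pv_card_bound (pvOuter B B.length) ((pvOuter B B.length).length + 1) hall
    omega
  have hk1 : ∀ k : Nat, k < Nat.find hex → PySem.Set.contains (pvOuter B B.length) ((0 : Int) + k + 1) = true := by
    intro k hkm
    have hne := Nat.find_min hex hkm
    cases h : PySem.Set.contains (pvOuter B B.length) ((k : Int) + 1) with
    | false => exact absurd h hne
    | true => simpa using h
  have hstop1 : PySem.Set.contains (pvOuter B B.length) ((0 : Int) + Nat.find hex + 1) = false := by
    simpa using Nat.find_spec hex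
  have hA : contiguous_prefix B = (0 : Int) + Nat.find hex := by
    rw [pv_diffs_eq]
    exact pv_stopA _ (Nat.find hex) 0 _ hbound hk1 hstop1
  have hB : contiguous_prefix_alt B = (0 : Int) + Nat.find hex := by
    have halt : contiguous_prefix_alt B
        = pvWhileB (pvBuildFL B).1 (pvBuildFL B).2
            (PySem.List.sorted (PySem.Dict.keys (pvBuildFL B).1) (fun v => v) false)
            0 (B.length * B.length) := rfl
    rw [halt]
    refine pv_stopB _ _ _ (Nat.find hex) 0 (B.length * B.length)
      (le_trans hbound (pvOuter_len B B.length)) ?_ ?_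
    · intro k hkm
      rw [← pv_pred_eq B _ (by positivity)]
      exact hk1 k hkm
    · rw [← pv_pred_eq B _ (by positivity)]
      exact hstop1
  rw [hA, hB]
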